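-- pv_equiv track=rewrite | github.com/promptillery-dev/promptillery | promptillery/analyze.py | _choose_metric
-- ===== SOURCE A (Python) =====
-- from typing import Any, Dict, Iterable, List, Sequence
--
-- PREFERRED_METRICS = (
--     "exact_match",
--     "accuracy",
--     "macro_f1",
--     "f1",
--     "perplexity",
--     "eval_loss",
-- )
--
-- def _choose_metric(
--     cycles: List[tuple[int, Dict[str, Any]]], metric: str | None
-- ) -> str | None:
--     if metric:
--         if any(metric in values for _, values in cycles):
--             return metric
--         return None
--     for candidate in PREFERRED_METRICS:
--         if any(candidate in values for _, values in cycles):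
--             return candidate
--     return None
-- ===== SOURCE B (Python) =====
-- PREFERRED_METRICS = (
--     "exact_match",
--     "accuracy",
--     "macro_f1",
--     "f1",
--     "perplexity",
--     "eval_loss",
-- )
--
-- def _choose_metric(cycles, metric):
--     # one pass over cycles builds the key index; resolution is a flat lookup
--     keys = set()
--     for _, values in cycles:
--         keys.update(values)
--     if metric:
--         return metric if metric in keys else None
--     for candidate in PREFERRED_METRICS:
--         if candidate in keys:
--             return candidate
--     return None
-- ===== Notes on version B (the rewrite author's own statement) =====
-- stated objective: alternative
-- what changed: B replaces A's repeated per-candidate any-scans over cycles with a single index-building pass that collects all metric keys into one set, after which both the given-metric branch and the preference order are resolved by flat membership lookups.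
import Mathlib
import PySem

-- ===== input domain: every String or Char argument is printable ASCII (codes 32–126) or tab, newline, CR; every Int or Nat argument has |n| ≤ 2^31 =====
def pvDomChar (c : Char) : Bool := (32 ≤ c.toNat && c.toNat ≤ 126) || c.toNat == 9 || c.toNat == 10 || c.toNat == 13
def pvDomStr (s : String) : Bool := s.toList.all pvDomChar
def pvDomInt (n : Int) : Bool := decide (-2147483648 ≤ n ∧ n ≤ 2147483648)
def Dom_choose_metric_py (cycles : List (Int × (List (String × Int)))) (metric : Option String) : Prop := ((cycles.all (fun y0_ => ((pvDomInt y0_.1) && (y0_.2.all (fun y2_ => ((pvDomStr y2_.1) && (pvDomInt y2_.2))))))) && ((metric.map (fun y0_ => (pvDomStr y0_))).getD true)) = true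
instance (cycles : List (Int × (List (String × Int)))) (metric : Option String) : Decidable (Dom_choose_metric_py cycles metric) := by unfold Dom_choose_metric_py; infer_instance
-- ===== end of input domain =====

-- Header: B builds the set of metric keys in one pass over cycles, then resolves by flat membership lookups (simpler control flow; same asymptotic cost).
-- ===== PORT A =====
def pvPreferredMetrics : List String :=
  ["exact_match", "accuracy", "macro_f1", "f1", "perplexity", "eval_loss"]

-- the 'for candidate in PREFERRED_METRICS' loop of A
def pvLoopA (cycles : List (Int × (List (String × Int)))) : List String → Option String
  | [] => none
  | c :: rest =>
    if cycles.any (fun p => p.2.any (fun kv => kv.1 == c)) then some c else pvLoopA cycles rest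

def choose_metric_py (cycles : List (Int × (List (String × Int)))) (metric : Option String) : Option String :=
  if metric.getD "" ≠ "" then
    if cycles.any (fun p => p.2.any (fun kv => kv.1 == metric.getD "")) then metric else none
  else
    pvLoopA cycles pvPreferredMetrics

-- ===== PORT B =====
-- the 'for candidate in PREFERRED_METRICS' loop of B, over the prebuilt key set
def pvLoopB (keys : PySem.Set String) : List String → Option String
  | [] => none
  | c :: rest => if PySem.Set.contains keys c then some c else pvLoopB keys rest

def choose_metric_py_alt (cycles : List (Int × (List (String × Int)))) (metric : Option String) : Option String :=
  let keys : PySem.Set String :=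
    cycles.foldl (fun s p => PySem.Set.update s (p.2.map Prod.fst)) PySem.Set.empty
  if metric.getD "" ≠ "" then
    if PySem.Set.contains keys (metric.getD "") then metric else none
  else
    pvLoopB keys pvPreferredMetrics

-- ===== PRECONDITION & SPEC =====
def Spec_choose_metric_py (cycles : List (Int × (List (String × Int)))) (metric : Option String) (out : Option String) : Prop := out = choose_metric_py_alt cycles metric
instance (cycles : List (Int × (List (String × Int)))) (metric : Option String) (out : Option String) : Decidable (Spec_choose_metric_py cycles metric out) := by unfold Spec_choose_metric_py; infer_instance

-- ===== CLAIM (what is proved, stated in full; the proofs are below) =====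
def Claim_equal_choose_metric_py : Prop := ∀ (cycles : List (Int × (List (String × Int)))) (metric : Option String), Dom_choose_metric_py cycles metric → Spec_choose_metric_py cycles metric (choose_metric_py cycles metric)

-- ===== LEMMAS AND PROOFS =====

-- membership in the accumulated key set = A's per-candidate scan of cycles
theorem pv_keys_contains (cycles : List (Int × (List (String × Int)))) (s : PySem.Set String) (x : String) :
    PySem.Set.contains (cycles.foldl (fun s p => PySem.Set.update s (p.2.map Prod.fst)) s) x
      = (PySem.Set.contains s x || cycles.any (fun p => p.2.any (fun kv => kv.1 == x))) := by
  induction cycles generalizing s with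
  | nil => simp
  | cons hd tl ih =>
    simp only [List.foldl_cons, List.any_cons, ih]
    simp only [PySem.Set.contains_eq_listContains]
    by_cases h1 : x ∈ s <;> by_cases h2 : ∃ kv ∈ hd.2, kv.1 = x <;> simp_all

theorem pv_loops_eq (cycles : List (Int × (List (String × Int)))) (l : List String) :
    pvLoopA cycles l
      = pvLoopB (cycles.foldl (fun s p => PySem.Set.update s (p.2.map Prod.fst)) PySem.Set.empty) l := by
  induction l with
  | nil => rfl
  | cons c rest ih =>
    simp only [pvLoopA, pvLoopB, pv_keys_contains, PySem.Set.empty, ih]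
    rfl

-- ===== VERDICT (by name: the statement is the Claim_ definition above) =====
theorem choose_metric_py_spec : Claim_equal_choose_metric_py := by
  intro cycles metric _
  unfold Spec_choose_metric_py choose_metric_py choose_metric_py_alt
  simp only [pv_keys_contains, ← pv_loops_eq]
  have he : PySem.Set.contains (PySem.Set.empty (α := String)) (metric.getD "") = false := rfl
  simp only [he, Bool.false_or]
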